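-- pv_equiv track=rewrite | github.com/TiburonB/HMMSTRTM | HMMSTRTM_github/blaster.py | ff2name
-- ===== SOURCE A (Python) =====
-- def ff2name(f): # "../../fastas/1ubq_A.fasta" --> "1ubq_A"
--     li = -1
--     while True:
--         try:
--             li = f.index('/')
--         except:
--             break
--         f = f[li+1:]
--     # f == '1ubq_A.fasta'
--     f = f[:len(f)-6]
--     return f
-- ===== SOURCE B (Python) =====
-- def ff2name(f): # one pass: accumulate basename, resetting at each '/'; then chop 6-char suffix
--     base = ''
--     for c in f:
--         base = '' if c == '/' else base + c
--     return base[:len(base)-6]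
-- ===== Notes on version B (the rewrite author's own statement) =====
-- stated objective: simpler
-- what changed: A repeatedly calls f.index('/') and reslices the string until none remains; B makes a single left-to-right pass that accumulates the basename, resetting the accumulator at each separator, then chops the 6-char suffix with base[:len(base)-6].
import Mathlib
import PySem

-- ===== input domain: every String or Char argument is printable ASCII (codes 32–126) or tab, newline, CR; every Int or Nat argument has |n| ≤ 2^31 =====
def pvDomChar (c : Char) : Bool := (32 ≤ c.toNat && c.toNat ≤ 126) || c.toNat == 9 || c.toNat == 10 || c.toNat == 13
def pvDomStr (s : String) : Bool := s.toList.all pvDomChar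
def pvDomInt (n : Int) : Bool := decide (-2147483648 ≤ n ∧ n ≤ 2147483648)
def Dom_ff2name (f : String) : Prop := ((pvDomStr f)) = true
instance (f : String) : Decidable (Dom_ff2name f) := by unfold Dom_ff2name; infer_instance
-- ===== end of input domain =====

-- B replaces A's repeated index('/')-and-reslice loop by a single accumulating pass over the
-- characters (simpler, one traversal); return values are proved identical on all inputs.

-- ===== PORT A =====
-- termination fact for A's while-loop: when '/' is found, the reslice strictly shrinks the string
theorem pv_find_slash_shrink (cs : List Char) (h : ¬ PySem.Chars.find cs ['/'] = -1) :
    (PySem.List.slice cs (some (PySem.Chars.find cs ['/'] + 1)) none).length < cs.length := by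
  have hspec := PySem.Chars.findFrom_natCast_spec cs ['/'] 0 (Nat.zero_le _)
    (by simpa using h)
  simp only [Nat.cast_zero, PySem.Chars.findFrom_zero] at hspec
  obtain ⟨hle, hpre, -⟩ := hspec
  obtain ⟨t, ht⟩ := hpre
  have hlt : (PySem.Chars.find cs ['/']).toNat < cs.length := by
    by_contra hge
    rw [List.drop_eq_nil_of_le (Nat.le_of_not_lt hge)] at ht
    simp at ht
  have h1 : (0:Int) ≤ PySem.Chars.find cs ['/'] + 1 := by omega
  rw [PySem.List.slice_from cs h1, List.length_drop]
  omega

-- transliteration of A's 'while True: li = f.index("/") (break on ValueError); f = f[li+1:]'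
def ff2nameLoop (cs : List Char) : List Char :=
  if h : PySem.Chars.find cs ['/'] = -1 then cs
  else ff2nameLoop (PySem.List.slice cs (some (PySem.Chars.find cs ['/'] + 1)) none)
termination_by cs.length
decreasing_by exact pv_find_slash_shrink cs h

def ff2name (f : String) : String :=
  let f1 := ff2nameLoop f.toList
  String.ofList (PySem.List.slice f1 none (some ((PySem.Chars.len f1 : Int) - 6)))

-- ===== PORT B =====
def ff2name_alt (f : String) : String :=
  let base := f.toList.foldl (fun base c => if c = '/' then [] else base ++ [c]) []
  String.ofList (PySem.List.slice base none (some ((PySem.Chars.len base : Int) - 6)))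

-- ===== PRECONDITION & SPEC =====
def Spec_ff2name (f : String) (out : String) : Prop := out = ff2name_alt f
instance (f : String) (out : String) : Decidable (Spec_ff2name f out) := by unfold Spec_ff2name; infer_instance

-- ===== CLAIM (what is proved, stated in full; the proofs are below) =====
def Claim_equal_ff2name : Prop := ∀ (f : String), Dom_ff2name f → Spec_ff2name f (ff2name f)

-- ===== LEMMAS AND PROOFS =====

-- the suffix of cs after its last '/'
def pvTailAfter (cs : List Char) : List Char :=
  (cs.reverse.takeWhile (fun c => c != '/')).reverse

theorem pv_takeWhile_append_slash (u w : List Char) :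
    List.takeWhile (fun c => c != '/') (u ++ '/' :: w) =
      List.takeWhile (fun c => c != '/') u := by
  induction u with
  | nil => simp
  | cons a u ih =>
      by_cases ha : a = '/'
      · simp [ha]
      · simp [ha, ih]

theorem pv_tailAfter_append (xs ys : List Char) :
    pvTailAfter (xs ++ '/' :: ys) = pvTailAfter ys := by
  unfold pvTailAfter
  have : (xs ++ '/' :: ys).reverse = ys.reverse ++ '/' :: xs.reverse := by simp
  rw [this, pv_takeWhile_append_slash]

theorem pv_tailAfter_no_slash (ys : List Char) (h : '/' ∉ ys) : pvTailAfter ys = ys := by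
  unfold pvTailAfter
  have : List.takeWhile (fun c => c != '/') ys.reverse = ys.reverse := by
    apply List.takeWhile_eq_self_iff.mpr
    intro x hx
    simp only [bne_iff_ne, ne_eq]
    intro hxe
    exact h (by simpa [hxe] using List.mem_reverse.mp hx)
  rw [this, List.reverse_reverse]

theorem pv_find_slash_eq_neg_one (cs : List Char) :
    PySem.Chars.find cs ['/'] = -1 ↔ '/' ∉ cs := by
  rw [PySem.Chars.find_eq_neg_one_iff]
  constructor
  · intro hni hm
    obtain ⟨s, t, rfl⟩ := List.append_of_mem hm
    exact hni ⟨s, t, by simp⟩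
  · intro hni hinf
    exact hni (List.singleton_sublist.mp hinf.sublist)

theorem pv_find_slash_split (cs : List Char) (h : ¬ PySem.Chars.find cs ['/'] = -1) :
    ∃ xs ys, cs = xs ++ '/' :: ys ∧
      PySem.List.slice cs (some (PySem.Chars.find cs ['/'] + 1)) none = ys := by
  have hspec := PySem.Chars.findFrom_natCast_spec cs ['/'] 0 (Nat.zero_le _)
    (by simpa using h)
  simp only [Nat.cast_zero, PySem.Chars.findFrom_zero] at hspec
  obtain ⟨hle, hpre, -⟩ := hspec
  obtain ⟨t, ht⟩ := hpre
  refine ⟨cs.take (PySem.Chars.find cs ['/']).toNat, t, ?_, ?_⟩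
  · conv_lhs => rw [← List.take_append_drop (PySem.Chars.find cs ['/']).toNat cs, ← ht]
    simp
  · have h1 : (0:Int) ≤ PySem.Chars.find cs ['/'] + 1 := by omega
    rw [PySem.List.slice_from cs h1]
    have h2 : (PySem.Chars.find cs ['/'] + 1).toNat = (PySem.Chars.find cs ['/']).toNat + 1 := by
      omega
    rw [h2, ← List.drop_drop, ← ht]
    simp

theorem pv_loopA_eq (n : Nat) (cs : List Char) (hn : cs.length ≤ n) :
    ff2nameLoop cs = if '/' ∈ cs then pvTailAfter cs else cs := by
  induction n generalizing cs with
  | zero =>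
      have : cs = [] := List.eq_nil_of_length_eq_zero (Nat.le_zero.mp hn)
      subst this
      have hfe : PySem.Chars.find ([] : List Char) ['/'] = -1 := by decide
      rw [ff2nameLoop, dif_pos hfe]
      simp
  | succ n ih =>
      rw [ff2nameLoop]
      by_cases h : PySem.Chars.find cs ['/'] = -1
      · rw [dif_pos h, if_neg ((pv_find_slash_eq_neg_one cs).mp h)]
      · rw [dif_neg h]
        obtain ⟨xs, ys, hcs, hsl⟩ := pv_find_slash_split cs h
        have hys : ys.length ≤ n := by
          have := pv_find_slash_shrink cs h
          rw [hsl] at this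
          omega
        rw [hsl, ih ys hys, hcs]
        have hm : '/' ∈ xs ++ '/' :: ys := by simp
        rw [if_pos hm, pv_tailAfter_append]
        by_cases hy : '/' ∈ ys
        · rw [if_pos hy]
        · rw [if_neg hy, pv_tailAfter_no_slash ys hy]

theorem pv_tailAfter_snoc (cs : List Char) (c : Char) (hc : c ≠ '/') :
    pvTailAfter (cs ++ [c]) = pvTailAfter cs ++ [c] := by
  unfold pvTailAfter
  simp [hc]

theorem pv_foldB_eq (cs : List Char) (acc : List Char) :
    cs.foldl (fun base c => if c = '/' then [] else base ++ [c]) acc =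
      if '/' ∈ cs then pvTailAfter cs else acc ++ cs := by
  induction cs using List.reverseRecOn generalizing acc with
  | nil => simp
  | append_singleton cs c ih =>
      rw [List.foldl_append]
      simp only [List.foldl_cons, List.foldl_nil]
      by_cases hc : c = '/'
      · subst hc
        have hm : '/' ∈ cs ++ ['/'] := by simp
        rw [if_pos hm]
        have : pvTailAfter (cs ++ ['/']) = pvTailAfter ([] : List Char) := by
          simpa using pv_tailAfter_append cs []
        rw [this]
        simp [pvTailAfter]
      · rw [ih, if_neg hc]
        have hm : ('/' ∈ cs ++ [c]) ↔ '/' ∈ cs := by simp [Ne.symm hc]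
        by_cases hy : '/' ∈ cs
        · rw [if_pos hy, if_pos (hm.mpr hy), pv_tailAfter_snoc cs c hc]
        · rw [if_neg hy, if_neg (fun h => hy (hm.mp h)), List.append_assoc]

-- ===== VERDICT (by name: the statement is the Claim_ definition above) =====
theorem ff2name_spec : Claim_equal_ff2name := by
  intro f _
  unfold Spec_ff2name ff2name ff2name_alt
  have h : ff2nameLoop f.toList =
      f.toList.foldl (fun base c => if c = '/' then [] else base ++ [c]) [] := by
    rw [pv_loopA_eq f.toList.length f.toList le_rfl, pv_foldB_eq]
    simp
  rw [h]
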